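-- pv_equiv track=rewrite | github.com/zakmayfield/pythonforfun | src/scripts/with_numbers.py | calculate_polarity
-- ===== SOURCE A (Python) =====
-- from typing import List, Dict
--
-- def calculate_polarity(nums: List[int]) -> Dict[str, int]:
--     negative = 0
--     positive = 0
--     for num in nums:
--         if num < 0:
--             negative += 1
--         else:
--             positive += 1
--     return {
--         "negative": negative,
--         "positive": positive
--     }
-- ===== SOURCE B (Python) =====
-- from typing import List, Dict
--
-- def calculate_polarity(nums: List[int]) -> Dict[str, int]:
--     # Sort, then binary-search for the first non-negative element:
--     # its position is the number of negatives.
--     s = sorted(nums)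
--     lo, hi = 0, len(s)
--     while lo < hi:
--         mid = (lo + hi) // 2
--         if s[mid] < 0:
--             lo = mid + 1
--         else:
--             hi = mid
--     return {"negative": lo, "positive": len(nums) - lo}
-- ===== Notes on version B (the rewrite author's own statement) =====
-- stated objective: alternative
-- what changed: Sorts the list and binary-searches for the partition point between negatives and non-negatives instead of counting with two branch counters in one linear pass.
import Mathlib
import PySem

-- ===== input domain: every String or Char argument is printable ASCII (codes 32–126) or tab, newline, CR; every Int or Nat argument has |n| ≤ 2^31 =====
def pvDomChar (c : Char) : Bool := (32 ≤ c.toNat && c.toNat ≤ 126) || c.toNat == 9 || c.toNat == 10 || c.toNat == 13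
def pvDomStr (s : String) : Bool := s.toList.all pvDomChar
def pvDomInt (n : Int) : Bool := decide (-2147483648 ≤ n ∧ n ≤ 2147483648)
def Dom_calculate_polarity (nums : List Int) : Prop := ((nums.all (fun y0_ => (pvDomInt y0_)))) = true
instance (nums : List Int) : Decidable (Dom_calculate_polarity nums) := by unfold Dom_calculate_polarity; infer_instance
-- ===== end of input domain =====

-- B sorts the list and binary-searches for the first non-negative element instead of
-- counting with two branch counters in one pass (alternative algorithm, same results).

-- ===== PORT A =====
-- A: loop over nums, incrementing one of two counters per element.
def calculate_polarity (nums : List Int) : List (String × Int) :=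
  let st := nums.foldl (fun (st : Int × Int) num =>
    if num < 0 then (st.1 + 1, st.2) else (st.1, st.2 + 1)) (0, 0)
  [("negative", st.1), ("positive", st.2)]

-- ===== PORT B =====
-- B's while loop: binary search on the sorted list for the first index with s[mid] >= 0.
-- s[mid] is ported as getD; the loop only probes mid < hi ≤ s.length, so the index is
-- always in range (exactly Python's behaviour there).
def pvBisectLoop (s : List Int) (lo hi : Nat) : Nat :=
  if lo < hi then
    let mid := (lo + hi) / 2
    if s.getD mid 0 < 0 then pvBisectLoop s (mid + 1) hi else pvBisectLoop s lo mid
  else lo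
termination_by hi - lo
decreasing_by all_goals omega

-- B: sorted(nums), binary search for the partition point, positives = len - negatives.
def calculate_polarity_alt (nums : List Int) : List (String × Int) :=
  let s := PySem.List.sorted nums (fun x => x) false
  let lo := pvBisectLoop s 0 s.length
  [("negative", (lo : Int)), ("positive", (nums.length : Int) - (lo : Int))]

-- ===== PRECONDITION & SPEC =====
def Spec_calculate_polarity (nums : List Int) (out : List (String × Int)) : Prop := out = calculate_polarity_alt nums
instance (nums : List Int) (out : List (String × Int)) : Decidable (Spec_calculate_polarity nums out) := by unfold Spec_calculate_polarity; infer_instance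

-- ===== CLAIM (what is proved, stated in full; the proofs are below) =====
def Claim_equal_calculate_polarity : Prop := ∀ (nums : List Int), Dom_calculate_polarity nums → Spec_calculate_polarity nums (calculate_polarity nums)

-- ===== LEMMAS AND PROOFS =====

-- A's fold from (a, b) yields (a + #negatives, b + (len - #negatives)).
theorem pv_fold_inv (nums : List Int) (a b : Int) :
    nums.foldl (fun (st : Int × Int) num =>
      if num < 0 then (st.1 + 1, st.2) else (st.1, st.2 + 1)) (a, b)
    = (a + (nums.countP (fun n => decide (n < 0)) : Int),
       b + ((nums.length : Int) - (nums.countP (fun n => decide (n < 0)) : Int))) := by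
  induction nums generalizing a b with
  | nil => simp
  | cons x xs ih =>
    by_cases hx : x < 0
    · simp only [List.foldl_cons, ite_true, ih, List.countP_cons, hx, decide_true,
        List.length_cons, Prod.mk.injEq]
      constructor <;> push_cast <;> ring
    · simp only [List.foldl_cons, ite_false, ih, List.countP_cons, hx, decide_false,
        List.length_cons, Prod.mk.injEq]
      constructor <;> push_cast <;> ring

-- A list split at k into negatives then non-negatives has exactly k negatives.
theorem pv_countP_of_split (s : List Int) (k : Nat) (hk : k ≤ s.length)
    (h1 : ∀ j (_ : j < s.length), j < k → s[j] < 0)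
    (h2 : ∀ j (hj : j < s.length), k ≤ j → 0 ≤ s[j]) :
    s.countP (fun n => decide (n < 0)) = k := by
  induction s generalizing k with
  | nil => simp only [List.countP_nil, List.length_nil] at hk ⊢; omega
  | cons x xs ih =>
    cases k with
    | zero =>
      simp only [List.countP_eq_zero]
      intro a ha
      obtain ⟨j, hj, rfl⟩ := List.mem_iff_getElem.mp ha
      have := h2 j hj (Nat.zero_le _)
      simp
      omega
    | succ k' =>
      have hx : x < 0 := by
        have := h1 0 (by simp) (Nat.succ_pos _)
        simpa using this
      have : xs.countP (fun n => decide (n < 0)) = k' := by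
        apply ih k' (by simpa using hk)
        · intro j hj hjk
          have := h1 (j + 1) (by simpa using Nat.succ_lt_succ hj) (Nat.succ_lt_succ hjk)
          simpa using this
        · intro j hj hjk
          have := h2 (j + 1) (by simpa using Nat.succ_lt_succ hj) (Nat.succ_le_succ hjk)
          simpa using this
      simp [hx, this]

-- The binary search maintains: everything below lo is negative, everything from hi on
-- is non-negative; on a sorted list it therefore lands exactly on the negative count.
theorem pv_bisect_count (s : List Int) (hs : s.Pairwise (· ≤ ·)) (lo hi : Nat)
    (hlo : lo ≤ hi) (hhi : hi ≤ s.length)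
    (h1 : ∀ j (_ : j < s.length), j < lo → s[j] < 0)
    (h2 : ∀ j (hj : j < s.length), hi ≤ j → 0 ≤ s[j]) :
    pvBisectLoop s lo hi = s.countP (fun n => decide (n < 0)) := by
  have hmono : ∀ i j (_ : i < s.length) (_ : j < s.length), i ≤ j → s[i] ≤ s[j] := by
    intro i j hi' hj' hij
    rcases Nat.lt_or_ge i j with h | h
    · exact List.pairwise_iff_getElem.mp hs i j hi' hj' h
    · have : i = j := by omega
      subst this; exact le_refl _
  unfold pvBisectLoop
  by_cases h : lo < hi
  · simp only [h, if_true]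
    have hmid : (lo + hi) / 2 < s.length := by omega
    have hgd : s.getD ((lo + hi) / 2) 0 = s[(lo + hi) / 2] := List.getD_eq_getElem s 0 hmid
    by_cases hv : s.getD ((lo + hi) / 2) 0 < 0
    · simp only [hv, if_true]
      exact pv_bisect_count s hs ((lo + hi) / 2 + 1) hi (by omega) hhi
        (by
          intro j hj hjlt
          have : s[j] ≤ s[(lo + hi) / 2] := hmono j _ hj hmid (by omega)
          rw [hgd] at hv; omega)
        h2
    · simp only [hv, if_false]
      exact pv_bisect_count s hs lo ((lo + hi) / 2) (by omega) (by omega) h1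
        (by
          intro j hj hjge
          have : s[(lo + hi) / 2] ≤ s[j] := hmono _ j hmid hj hjge
          rw [hgd] at hv; omega)
  · simp only [h, if_false]
    have hle : lo = hi := by omega
    subst hle
    exact (pv_countP_of_split s lo (by omega) h1 h2).symm
termination_by hi - lo
decreasing_by all_goals omega

-- ===== VERDICT (by name: the statement is the Claim_ definition above) =====
theorem calculate_polarity_spec : Claim_equal_calculate_polarity := by
  intro nums _
  unfold Spec_calculate_polarity calculate_polarity calculate_polarity_alt
  have hperm := PySem.List.sorted_perm nums (fun x => x) false
  have hpw : (PySem.List.sorted nums (fun x => x) false).Pairwise (· ≤ ·) := by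
    simpa using PySem.List.sorted_pairwise nums (fun x => x)
  have hb := pv_bisect_count (PySem.List.sorted nums (fun x => x) false) hpw 0
    (PySem.List.sorted nums (fun x => x) false).length (Nat.zero_le _) (le_refl _)
    (by intro j hj hjl; omega)
    (by intro j hj hjge; omega)
  rw [pv_fold_inv]
  simp only [hb, hperm.countP_eq]
  ring_nf
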